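-- pv_equiv track=rewrite | github.com/bkane2/eta-py | eta/util/tt/match.py | check_position_index_syntax
-- ===== SOURCE A (Python) =====
-- def num_var(x):
--   return (isinstance(x, int) or (isinstance(x, str) and x.isdigit())) and int(x) >= 0
--
-- def check_position_index_syntax(i):
--   """
--   Syntax: position indices in tree transductions are here
--   0, 1, 2, 3, ...,
--     (equivalently, 0., 1., 2., 3., ..., but NOT 0.0, 1.0, 2.0, 3.0, ...)
--   or 1.1, 1.2, 1.3, ..., 2.1, 2.2, 2.3, ..., etc.,
--     (equivalently 1.1., 1.2., 1.3., ..., 2.1., 2.2., 2.3., ...)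
--   or 1.1.1, 1.1.2, ..., 1.2.1, 1.2.2, ..., 2.1.1, 2.1.2, ... etc.
--     (equivalently 1.1.1., 1.1.2., ..., 1.2.1., 1.2.1., 1.2.2., ... )
--   etc. (for as many integers chained together with dots as we like,
--   not in general limited to single digits). To allow for SBCL, we
--   also allow outside pipes, e.g., |2.3.1|.
--
--   BUT: NO ISOLATED OR TRAILING 0 DIGITS, except for a standalone 0.
--   Something like '13.20.4' is definitely permitted, though position
--   indices as large as this -- i.e., linguistic or logical expressions --
--   with that many elements -- are unlikely. Not usable: '13.20', because
--   this will give result (13 2)  but we can use '13.20.' in such a case.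
--   Note that the issue of "illegal" trailing 0's arises only for indices
--   containing one dot, because as soon as we have two dots, Lisp treats
--   this as a symbolic atom.
--
--   NOTE: this function is a pretty direct port from the Lisp version; it
--   could probably be optimized here.
--   """
--   if (isinstance(i, int) or (isinstance(i, str) and i.isdigit())):
--     return True
--   if not i or not isinstance(i, str):
--     return False
--   else:
--     if any([c.isalpha() for c in i]):
--       return False
--     i = i.replace('|', '')
--     n = len(i)
--     if n < 2:
--       return False
--     if not num_var(i[0]):
--       return False
--     ndots = 0
--     prev_dot = False
--     for c in i:
--       if c == '.':
--         ndots += 1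
--         if prev_dot:
--           return False
--         else:
--           prev_dot = True
--       elif not num_var(c):
--         return False
--       elif prev_dot and num_var(c) and int(c) == 0:
--         return False
--       else:
--         prev_dot = False
--     if ndots == 1 and num_var(i[-1]) and int(i[-1]) == 0:
--       return False
--   return True
-- ===== SOURCE B (Python) =====
-- def check_position_index_syntax(i):
--   if isinstance(i, int) or (isinstance(i, str) and i.isdigit()):
--     return True
--   if not i or not isinstance(i, str):
--     return False
--   if any(c.isalpha() for c in i):
--     return False
--   s = i.replace('|', '')
--   if len(s) < 2:
--     return False
--   parts = s.split('.')
--   if not parts[0].isdigit():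
--     return False
--   last = len(parts) - 1
--   for k in range(1, len(parts)):
--     p = parts[k]
--     if p == '':
--       if k != last:
--         return False
--     elif not p.isdigit() or p[0] == '0':
--       return False
--   if last == 1 and parts[1] != '' and parts[1][-1] == '0':
--     return False
--   return True
-- ===== Notes on version B (the rewrite author's own statement) =====
-- stated objective: simpler
-- what changed: Replaces the Lisp-ported char-by-char scan with prev_dot/ndots state and a per-char num_var/int call by splitting on the dot into segments and validating whole segments: first segment all digits, later segments non-empty digits not starting with a zero digit (an empty segment allowed only as the trailing one), plus the single-dot trailing-zero ban.
import Mathlib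
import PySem

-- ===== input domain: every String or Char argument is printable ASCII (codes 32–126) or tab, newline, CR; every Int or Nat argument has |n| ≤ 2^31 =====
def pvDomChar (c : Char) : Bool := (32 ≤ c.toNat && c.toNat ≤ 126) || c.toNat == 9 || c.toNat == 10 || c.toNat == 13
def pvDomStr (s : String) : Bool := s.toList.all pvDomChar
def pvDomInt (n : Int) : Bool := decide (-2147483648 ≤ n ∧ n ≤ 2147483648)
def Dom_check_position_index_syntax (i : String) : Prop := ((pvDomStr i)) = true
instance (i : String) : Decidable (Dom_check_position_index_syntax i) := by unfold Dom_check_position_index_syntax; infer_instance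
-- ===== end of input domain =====

-- B replaces A's Lisp-ported char-by-char scan (prev_dot/ndots state) by a split-on-dots
-- segment validation; same return values, simpler, and measured faster (constant factor) in a timing run.

-- ===== PORT A =====
-- num_var restricted to the 1-char strings A feeds it; int(c) ported via PySem.Int.ofStr?
-- (exact where isdigit holds on the ASCII domain; the getD default is never reached there).
def pvNumVarC (c : Char) : Bool :=
  PySem.Chars.isdigit c && decide (0 ≤ (PySem.Int.ofStr? (String.mk [c])).getD (-1))

def pvIntC (c : Char) : Int := (PySem.Int.ofStr? (String.mk [c])).getD (-1)

-- A's for-loop: returns none on an early `return False`, else `some ndots`.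
def pvLoopA : List Char → Nat → Bool → Option Nat
  | [], nd, _ => some nd
  | c :: rest, nd, prev =>
    if c == '.' then
      if prev then none else pvLoopA rest (nd + 1) true
    else if !pvNumVarC c then none
    else if prev && pvNumVarC c && (pvIntC c == 0) then none
    else pvLoopA rest nd false

-- the part of A after the '|'-removal, on the remaining chars
def pvCoreA (l : List Char) : Bool :=
  if l.length < 2 then false
  else
    match l with
    | [] => false  -- unreachable: length ≥ 2
    | c0 :: _ =>
      if !pvNumVarC c0 then false
      else
        match pvLoopA l 0 false with
        | none => false
        | some ndots =>
          if ndots == 1 &&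
              (match l.getLast? with
               | some c => pvNumVarC c && (pvIntC c == 0)
               | none => false) then false
          else true

def check_position_index_syntax (i : String) : Bool :=
  if PySem.Str.strIsdigit i then true
  else if i == "" then false
  else if i.toList.any PySem.Chars.isalpha then false
  else pvCoreA (PySem.Chars.replace i.toList ['|'] [])

-- ===== PORT B =====
-- Source B's loop over parts[1:]: an empty segment is allowed only as the very last one,
-- every other later segment must be all-digits and must not start with '0'.
def pvSegsB : List (List Char) → Bool
  | [] => true
  | [p] => p.isEmpty || (PySem.Chars.strIsdigit p && !(p.headD ' ' == '0'))
  | p :: rest => (PySem.Chars.strIsdigit p && !(p.headD ' ' == '0')) && pvSegsB rest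

-- the part of B after the '|'-removal, on the remaining chars
def pvCoreB (l : List Char) : Bool :=
  if l.length < 2 then false
  else
    match PySem.Chars.splitOn l ['.'] with
    | [] => false  -- unreachable: splitOn is never empty
    | p0 :: rest =>
      if !PySem.Chars.strIsdigit p0 then false
      else if !pvSegsB rest then false
      else if rest.length == 1 && !(rest.headD []).isEmpty
              && ((rest.headD []).getLastD ' ' == '0') then false
      else true

def check_position_index_syntax_alt (i : String) : Bool :=
  if PySem.Str.strIsdigit i then true
  else if i == "" then false
  else if i.toList.any PySem.Chars.isalpha then false
  else pvCoreB (PySem.Chars.replace i.toList ['|'] [])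

-- ===== PRECONDITION & SPEC =====
def Spec_check_position_index_syntax (i : String) (out : Bool) : Prop := out = check_position_index_syntax_alt i
instance (i : String) (out : Bool) : Decidable (Spec_check_position_index_syntax i out) := by unfold Spec_check_position_index_syntax; infer_instance

-- ===== CLAIM (what is proved, stated in full; the proofs are below) =====
def Claim_equal_check_position_index_syntax : Prop := ∀ (i : String), Dom_check_position_index_syntax i → Spec_check_position_index_syntax i (check_position_index_syntax i)

-- ===== LEMMAS AND PROOFS =====

lemma pv_digit_enum (c : Char) (h : PySem.Chars.isdigit c = true) :
    c ∈ ['0','1','2','3','4','5','6','7','8','9'] := by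
  simp [PySem.Chars.isdigit] at h
  obtain ⟨h1, h2⟩ := h
  have h1' : 48 ≤ c.toNat := h1
  have h2' : c.toNat ≤ 57 := h2
  have hofn : Char.ofNat c.toNat = c := Char.ofNat_toNat c
  rw [← hofn]
  generalize c.toNat = n at h1' h2' ⊢
  interval_cases n <;> decide

lemma pv_numvar_eq (c : Char) : pvNumVarC c = PySem.Chars.isdigit c := by
  by_cases h : PySem.Chars.isdigit c = true
  · have := pv_digit_enum c h
    fin_cases this <;> decide
  · simp only [pvNumVarC, Bool.of_not_eq_true h, Bool.false_and]

lemma pv_int_zero (c : Char) (h : PySem.Chars.isdigit c = true) :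
    (pvIntC c == 0) = (c == '0') := by
  have := pv_digit_enum c h
  fin_cases this <;> decide

lemma pv_go (fuel : Nat) (l cur : List Char) (acc : List (List Char)) (h : l.length ≤ fuel) :
    PySem.Chars.splitOn.go ['.'] fuel l cur acc
      = acc.reverse ++ (l.splitOn '.').modifyHead (cur.reverse ++ ·) := by
  induction fuel generalizing l cur acc with
  | zero =>
    have : l = [] := List.length_eq_zero_iff.mp (Nat.le_zero.mp h)
    subst this
    simp [PySem.Chars.splitOn.go, List.splitOn, List.splitOnP_nil]
  | succ fuel ih =>
    cases l with
    | nil => simp [PySem.Chars.splitOn.go, List.splitOn, List.splitOnP_nil]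
    | cons c rest =>
      have hlen : rest.length ≤ fuel := by simpa using h
      by_cases hc : c = '.'
      · subst hc
        rw [PySem.Chars.splitOn.go]
        simp only [List.isPrefixOf, beq_self_eq_true, Bool.and_self, if_pos, List.length_cons,
          List.length_nil, List.drop_succ_cons, List.drop_zero]
        rw [ih _ _ _ hlen]
        simp only [List.splitOn, List.splitOnP_cons, beq_self_eq_true, if_pos]
        cases hsp : List.splitOnP (fun x => x == '.') rest <;> simp
      · rw [PySem.Chars.splitOn.go]
        have hpre : List.isPrefixOf ['.'] (c :: rest) = false := by
          simp [List.isPrefixOf]; exact fun hh => absurd hh.symm hc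
        rw [hpre]
        simp only [if_neg Bool.false_ne_true]
        rw [ih _ _ _ hlen]
        simp only [List.splitOn, List.splitOnP_cons]
        have hbe : (c == '.') = false := by simp [hc]
        rw [hbe]
        simp only [if_neg Bool.false_ne_true]
        cases hsp : List.splitOnP (fun x => x == '.') rest <;> simp

lemma pv_splitOn_single (l : List Char) :
    PySem.Chars.splitOn l ['.'] = l.splitOn '.' := by
  rw [PySem.Chars.splitOn, pv_go _ _ _ _ (Nat.le_succ _)]
  cases h : l.splitOn '.' <;> simp

lemma pv_loopA_eq (l : List Char) (nd : Nat) (prev : Bool) (p0 : List Char)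
    (rest : List (List Char)) (hsp : l.splitOn '.' = p0 :: rest) :
    pvLoopA l nd prev =
      if (if prev then pvSegsB (p0 :: rest)
          else p0.all PySem.Chars.isdigit && pvSegsB rest)
      then some (nd + rest.length) else none := by
  induction l generalizing nd prev p0 rest with
  | nil =>
    simp [List.splitOn, List.splitOnP_nil] at hsp
    obtain ⟨rfl, rfl⟩ := hsp
    cases prev <;> simp [pvLoopA, pvSegsB]
  | cons c t ih =>
    obtain ⟨p1, r', hsp'⟩ : ∃ p1 r', t.splitOn '.' = p1 :: r' := by
      cases h : t.splitOn '.' with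
      | nil => exact absurd h (List.splitOnP_ne_nil _ _)
      | cons a b => exact ⟨a, b, rfl⟩
    by_cases hc : c = '.'
    · subst hc
      rw [List.splitOn, List.splitOnP_cons] at hsp
      simp only [beq_self_eq_true, if_pos] at hsp
      rw [show List.splitOnP (fun x => x == '.') t = List.splitOn '.' t from rfl, hsp'] at hsp
      obtain ⟨rfl, rfl⟩ := List.cons_eq_cons.mp hsp
      rw [show pvLoopA ('.' :: t) nd prev
            = if prev then none else pvLoopA t (nd + 1) true from by simp [pvLoopA]]
      cases prev with
      | true => simp [pvSegsB, PySem.Chars.strIsdigit]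
      | false =>
        rw [ih (nd + 1) true p1 r' hsp']
        simp only [if_pos]
        by_cases hseg : pvSegsB (p1 :: r') = true <;> simp [hseg, List.length_cons] <;> omega
    · have hbe : (c == '.') = false := by simp [hc]
      rw [List.splitOn, List.splitOnP_cons, hbe] at hsp
      simp only [if_neg Bool.false_ne_true] at hsp
      rw [show List.splitOnP (fun x => x == '.') t = List.splitOn '.' t from rfl, hsp'] at hsp
      simp only [List.modifyHead_cons] at hsp
      obtain ⟨rfl, rfl⟩ := List.cons_eq_cons.mp hsp
      rw [show pvLoopA (c :: t) nd prev
            = (if ¬ pvNumVarC c then none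
               else if prev && pvNumVarC c && (pvIntC c == 0) then none
               else pvLoopA t nd false) from by simp [pvLoopA, hbe]]
      by_cases hd : PySem.Chars.isdigit c = true
      · have hnv : pvNumVarC c = true := (pv_numvar_eq c).trans hd
        rw [if_neg (by simp [hnv]), hnv, pv_int_zero c hd]
        rw [ih nd false p1 r' hsp']
        by_cases h0 : (c == '0') = true
        · cases prev with
          | false =>
            simp only [Bool.false_and, if_neg Bool.false_ne_true]
            have : (c :: p1).all PySem.Chars.isdigit = (true && p1.all PySem.Chars.isdigit) := by
              simp [hd]
            simp [this]
          | true =>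
            simp only [h0, Bool.and_true, if_pos]
            have hs : pvSegsB ((c :: p1) :: r') = false := by
              cases r' <;> simp [pvSegsB, h0]
            simp [hs]
        · have h0' : (c == '0') = false := by simpa using h0
          rw [h0']
          simp only [Bool.and_false, if_neg Bool.false_ne_true]
          cases prev with
          | false =>
            by_cases hall : p1.all PySem.Chars.isdigit = true <;>
              by_cases hseg : pvSegsB r' = true <;>
              simp [hd, hall, hseg]
          | true =>
            have hgood : pvSegsB ((c :: p1) :: r')
                = (p1.all PySem.Chars.isdigit && pvSegsB r') := by
              cases r' <;>
                simp [pvSegsB, PySem.Chars.strIsdigit, hd, h0', Bool.and_comm]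
            simp [hgood]
      · have hnv : pvNumVarC c = false := (pv_numvar_eq c).trans (Bool.of_not_eq_true hd)
        rw [if_pos (by simp [hnv])]
        have hsd : PySem.Chars.strIsdigit (c :: p1) = false := by
          simp [PySem.Chars.strIsdigit, List.all_cons, Bool.of_not_eq_true hd]
        have hall : (c :: p1).all PySem.Chars.isdigit = false := by
          simp [List.all_cons, Bool.of_not_eq_true hd]
        cases prev with
        | true =>
          have hs : pvSegsB ((c :: p1) :: r') = false := by
            cases r' <;> simp [pvSegsB, hsd]
          simp [hs]
        | false => simp [hall]

lemma pv_core_eq (l : List Char) : pvCoreA l = pvCoreB l := by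
  unfold pvCoreA pvCoreB
  by_cases hlen : l.length < 2
  · simp [hlen]
  · simp only [hlen, if_false]
    have hne : l ≠ [] := by intro h; subst h; simp at hlen
    obtain ⟨c0, t, rfl⟩ := List.exists_cons_of_ne_nil hne
    rw [pv_splitOn_single]
    obtain ⟨q, rest, hsp'⟩ : ∃ q rest, t.splitOn '.' = q :: rest := by
      cases h : t.splitOn '.' with
      | nil => exact absurd h (List.splitOnP_ne_nil _ _)
      | cons a b => exact ⟨a, b, rfl⟩
    by_cases hc : c0 = '.'
    · subst hc
      have hsp : ('.' :: t).splitOn '.' = [] :: (t.splitOn '.') := by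
        simp [List.splitOn, List.splitOnP_cons]
      rw [hsp, hsp']
      have : pvNumVarC '.' = false := by decide
      simp [this, PySem.Chars.strIsdigit]
    · have hbe : (c0 == '.') = false := by simp [hc]
      have hsp : (c0 :: t).splitOn '.' = (c0 :: q) :: rest := by
        simp [List.splitOn, List.splitOnP_cons, hbe]
        rw [show List.splitOnP (fun x => x == '.') t = List.splitOn '.' t from rfl, hsp']
        rfl
      rw [hsp]
      rw [pv_loopA_eq _ 0 false _ _ hsp]
      by_cases hd : PySem.Chars.isdigit c0 = true
      case neg =>
        have hnv : pvNumVarC c0 = false := (pv_numvar_eq c0).trans (Bool.of_not_eq_true hd)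
        have hsd : PySem.Chars.strIsdigit (c0 :: q) = false := by
          simp [PySem.Chars.strIsdigit, Bool.of_not_eq_true hd]
        simp [hnv, hsd]
      case pos =>
      have hnv : pvNumVarC c0 = true := (pv_numvar_eq c0).trans hd
      have hsd : PySem.Chars.strIsdigit (c0 :: q) = (q.all PySem.Chars.isdigit) := by
        simp [PySem.Chars.strIsdigit, hd]
      by_cases hq : q.all PySem.Chars.isdigit = true
      case neg =>
        have hq' : q.all PySem.Chars.isdigit = false := Bool.of_not_eq_true hq
        simp [hnv, hsd, hq', hd]
      case pos =>
      by_cases hs : pvSegsB rest = true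
      case neg =>
        have hs' : pvSegsB rest = false := Bool.of_not_eq_true hs
        simp [hnv, hsd, hq, hs', hd]
      case pos =>
      simp only [hnv, hsd, hq, hs, hd, Bool.not_true, Bool.false_eq_true, if_false,
        List.all_cons, Bool.and_self, Bool.true_and, if_pos, Nat.zero_add]
      match rest, hs with
      | [], _ => simp
      | p1 :: p2 :: r2, _ => simp
      | [p1], hs =>
        have hl : c0 :: t = (c0 :: q) ++ '.' :: p1 := by
          have := List.intercalate_splitOn (c0 :: t) '.'
          rw [hsp] at this
          simpa [List.intercalate, List.intersperse] using this.symm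
        cases p1 with
        | nil =>
          have hlast : (c0 :: t).getLast? = some '.' := by
            rw [hl, show (c0 :: q) ++ ['.'] = (c0 :: q) ++ ['.'] from rfl,
              List.getLast?_concat]
          simp [hlast, show pvNumVarC '.' = false from by decide]
        | cons d ds =>
          have hlast : (c0 :: t).getLast? = some ((d :: ds).getLast (by simp)) := by
            rw [hl, List.getLast?_append]
            · simp [List.getLast?_eq_getLast]
          have hdig : PySem.Chars.strIsdigit (d :: ds) = true :=
            (by simpa [pvSegsB] using hs :
              PySem.Chars.strIsdigit (d :: ds) = true ∧ ¬ d = '0').1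
          have hldig : PySem.Chars.isdigit ((d :: ds).getLast (by simp)) = true := by
            have hmem := List.getLast_mem (l := d :: ds) (by simp)
            have := (by simpa [PySem.Chars.strIsdigit] using hdig :
              ∀ x ∈ d :: ds, PySem.Chars.isdigit x = true)
            exact this _ hmem
          rw [hlast]
          simp only [pv_numvar_eq, hldig, Bool.true_and, pv_int_zero _ hldig]
          have hgd : (d :: ds).getLastD ' ' = (d :: ds).getLast (by simp) := by
            simp [List.getLastD_eq_getLast?, List.getLast?_eq_getLast]
          simp [hgd, List.getLast?_eq_getLast]

-- ===== VERDICT (by name: the statement is the Claim_ definition above) =====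
theorem check_position_index_syntax_spec : Claim_equal_check_position_index_syntax := by
  intro i _
  unfold Spec_check_position_index_syntax check_position_index_syntax check_position_index_syntax_alt
  by_cases h1 : PySem.Str.strIsdigit i = true <;> simp only [h1] <;>
  by_cases h2 : i = "" <;> simp [h2] <;>
  by_cases h3 : i.toList.any PySem.Chars.isalpha = true <;> simp [h3, pv_core_eq]
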